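-- pv_equiv track=rewrite | github.com/AndresGarciaEscovar/Python-DateValidator | validator/validator.py | get_tokenized
-- ===== SOURCE A (Python) =====
-- import copy
--
-- def get_protected() -> tuple:
--     """
--         Gets the protected characters.
--
--         :return: The tuple with the protected characters.
--     """
--     return "Y", "M", "D", "h", "m", "s", "t"
--
-- def get_tokenized(string: str) -> tuple:
--     """
--         Tokenizes the given string at the special characters, i.e., the
--         non-protected characters.
--
--         :param string:
--
--         :return: The list of generated, non-empty strings that are generated
--          when breaking the string at the tokens.
--     """
--
--     # Auxiliary variables.
--     indexes = []
--     pchars = get_protected()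
--     string_ = ""
--     tokens = []
--
--     # Check character by character.
--     for i, character in enumerate(string):
--
--         # Add the string to the tokens.
--         if character not in pchars:
--             # Save the index where the characters are located.
--             indexes.append(i)
--
--             # Don't append empty strings.
--             if string_ == "":
--                 continue
--
--             # Append the token.
--             tokens.append(copy.deepcopy(string_))
--             string_ = ""
--             continue
--
--         # Kep adding characters.
--         string_ += character
--
--     # Append the final string.
--     tokens.append(string_) if not string_ == "" else None
--
--     return tuple(tokens), indexes
-- ===== SOURCE B (Python) =====
-- import re
--
--
-- def get_tokenized(string: str) -> tuple:
--     """Two independent passes: indexes via enumerate comprehension,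
--     tokens via a regex over maximal runs of protected characters."""
--     indexes = [i for i, c in enumerate(string) if c not in "YMDhmst"]
--     tokens = tuple(re.findall(r"[YMDhmst]+", string))
--     return tokens, indexes
-- ===== Notes on version B (the rewrite author's own statement) =====
-- stated objective: idiomatic
-- what changed: Replaced the single interleaved accumulator loop (pending-string buffer, conditional flushes, trailing append) by two independent passes: a list comprehension over enumerate for the indexes and re.findall of maximal protected-character runs for the tokens.
import Mathlib
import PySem

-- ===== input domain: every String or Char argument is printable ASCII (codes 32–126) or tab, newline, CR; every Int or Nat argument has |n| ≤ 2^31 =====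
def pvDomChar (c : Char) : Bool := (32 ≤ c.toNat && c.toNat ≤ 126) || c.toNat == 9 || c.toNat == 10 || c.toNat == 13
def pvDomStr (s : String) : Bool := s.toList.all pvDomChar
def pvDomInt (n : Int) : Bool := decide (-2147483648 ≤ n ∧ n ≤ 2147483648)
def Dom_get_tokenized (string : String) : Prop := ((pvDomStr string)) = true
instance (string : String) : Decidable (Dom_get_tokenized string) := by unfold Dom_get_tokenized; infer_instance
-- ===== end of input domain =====

-- B restructures A's single interleaved accumulator loop into two independent passes
-- (indexes by a comprehension over enumerate, tokens as maximal protected runs); same results, not faster.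

-- protected characters ('Y','M','D','h','m','s','t'), shared predicate
def pvProt (c : Char) : Bool :=
  c == 'Y' || c == 'M' || c == 'D' || c == 'h' || c == 'm' || c == 's' || c == 't'

-- ===== PORT A =====
-- A's single pass over enumerate(string): state = (indexes, pending string_, tokens)
def pvALoop : List Char → Int → List Int → List Char → List String → List String × List Int
  | [], _, indexes, cur, tokens =>
      (if cur = [] then tokens else tokens ++ [String.ofList cur], indexes)
  | c :: rest, i, indexes, cur, tokens =>
      if pvProt c then
        pvALoop rest (i + 1) indexes (cur ++ [c]) tokens
      else if cur = [] then
        pvALoop rest (i + 1) (indexes ++ [i]) [] tokens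
      else
        pvALoop rest (i + 1) (indexes ++ [i]) [] (tokens ++ [String.ofList cur])

def get_tokenized (string : String) : List String × List Int :=
  pvALoop string.toList 0 [] [] []

-- ===== PORT B =====
-- hand port of re.findall(r"[YMDhmst]+", string): maximal runs of protected characters,
-- exact for this regex (each run starts at a protected char and extends maximally)
def pvRuns : List Char → List String
  | [] => []
  | c :: rest =>
      if pvProt c then
        String.ofList (c :: rest.takeWhile pvProt) :: pvRuns (rest.dropWhile pvProt)
      else
        pvRuns rest
termination_by cs => cs.length
decreasing_by
  · exact Nat.lt_succ_of_le (List.length_dropWhile_le _ _)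
  · simp

def get_tokenized_alt (string : String) : List String × List Int :=
  (pvRuns string.toList,
   (PySem.List.enumerate string.toList 0).filterMap
     (fun p => if pvProt p.2 then none else some p.1))

-- ===== PRECONDITION & SPEC =====
def Spec_get_tokenized (string : String) (out : List String × List Int) : Prop := out = get_tokenized_alt string
instance (string : String) (out : List String × List Int) : Decidable (Spec_get_tokenized string out) := by unfold Spec_get_tokenized; infer_instance

-- ===== CLAIM (what is proved, stated in full; the proofs are below) =====
def Claim_equal_get_tokenized : Prop := ∀ (string : String), Dom_get_tokenized string → Spec_get_tokenized string (get_tokenized string)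

-- ===== LEMMAS AND PROOFS =====

-- accumulator-free description of A's pending-token stream
def pvToksF : List Char → List Char → List String
  | cur, [] => if cur = [] then [] else [String.ofList cur]
  | cur, c :: rest =>
      if pvProt c then pvToksF (cur ++ [c]) rest
      else if cur = [] then pvToksF [] rest
      else String.ofList cur :: pvToksF [] rest

-- accumulator-free description of A's index stream
def pvIdxF : Int → List Char → List Int
  | _, [] => []
  | i, c :: rest => if pvProt c then pvIdxF (i + 1) rest else i :: pvIdxF (i + 1) rest

theorem pvALoop_eq (cs : List Char) : ∀ (i : Int) (idx : List Int) (cur : List Char) (toks : List String),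
    pvALoop cs i idx cur toks = (toks ++ pvToksF cur cs, idx ++ pvIdxF i cs) := by
  induction cs with
  | nil => intro i idx cur toks; simp [pvALoop, pvToksF, pvIdxF]; split <;> simp
  | cons c rest ih =>
      intro i idx cur toks
      by_cases hp : pvProt c
      · simp [pvALoop, pvToksF, pvIdxF, hp, ih]
      · by_cases hc : cur = []
        · simp [pvALoop, pvToksF, pvIdxF, hp, hc, ih]
        · simp [pvALoop, pvToksF, pvIdxF, hp, hc, ih]

theorem pvToksF_eq (cs : List Char) : ∀ (cur : List Char),
    pvToksF cur cs = if cur = [] then pvRuns cs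
      else String.ofList (cur ++ cs.takeWhile pvProt) :: pvRuns (cs.dropWhile pvProt) := by
  induction cs with
  | nil => intro cur; simp [pvToksF, pvRuns]
  | cons c rest ih =>
      intro cur
      by_cases hp : pvProt c
      · have h1 : pvToksF cur (c :: rest) = pvToksF (cur ++ [c]) rest := by
          simp [pvToksF, hp]
        rw [h1, ih]
        simp [hp]
        intro hc
        simp [hc, pvRuns, hp]
      · by_cases hc : cur = []
        · simp [pvToksF, hp, hc, ih, pvRuns]
        · simp [pvToksF, hp, hc, ih, pvRuns]

theorem pvIdxF_eq (cs : List Char) : ∀ (i : Int),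
    (PySem.List.enumerate cs i).filterMap (fun p => if pvProt p.2 then none else some p.1)
      = pvIdxF i cs := by
  induction cs with
  | nil => intro i; simp [PySem.List.enumerate_nil, pvIdxF]
  | cons c rest ih =>
      intro i
      rw [PySem.List.enumerate_cons]
      by_cases hp : pvProt c
      · simp [pvIdxF, hp, ih]
      · simp [pvIdxF, hp, ih]

-- ===== VERDICT (by name: the statement is the Claim_ definition above) =====
theorem get_tokenized_spec : Claim_equal_get_tokenized := by
  intro s _
  unfold Spec_get_tokenized get_tokenized get_tokenized_alt
  rw [pvALoop_eq, pvToksF_eq, pvIdxF_eq]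
  simp
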